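-- pv_equiv track=rewrite | github.com/dino-code/ai-wumpus-agent | wwagent.py | enumerateModels
-- ===== SOURCE A (Python) =====
-- from itertools import product # used to enumerate pit, wumpus, and gold configurations
--
-- def enumerateModels(frontier):
--     model_list = []
--
--     model_configs = product([True, False], repeat=len(frontier)*2) # this will produce 2^(len(frontier)*2) models
--
--     for model_config in model_configs:  # for each model configuration
--         model = []
--         pos = 0
--         for square in frontier:
--             model.append((square[0], model_config[pos], model_config[pos+1])) # append the generated hasPit and hasWumpus
--             pos = pos+2                                     # increment pos by 2
--         model_list.append(model)                            # append the model to the model list -- each model appended is a possible frontier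
--
--     '''
--     For a frontier with 2 squares, each element of enums will have 4 configurations slots
--     each containing a True or False. For example, a possible configuration is: [False, True, True, True].
--     The way to interpret this is that the first 2 numbers correspond to the following
--     values for the first square in frontier (hasPit, hasWumpus) and the last 2
--     correspond to the respective values for the second square.
--     '''
--
--     return model_list
-- ===== SOURCE B (Python) =====
-- def enumerateModels(frontier):
--     # Iteratively extend partial models one frontier square at a time:
--     # start from the single empty model and, for each square, branch every
--     # partial model into the four (pit, wumpus) possibilities. No itertools,
--     # no bit-vector indexing; the first square naturally varies slowest.
--     models = [[]]
--     for square in frontier: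
--         models = [m + [(square[0], pit, wumpus)]
--                   for m in models
--                   for pit in (True, False)
--                   for wumpus in (True, False)]
--     return models
-- ===== Notes on version B (the rewrite author's own statement) =====
-- stated objective: simpler
-- what changed: B drops itertools entirely and grows the model list iteratively: starting from the single empty model, each frontier square branches every partial model into its four (pit,wumpus) extensions, removing A's flat 2n-bit product and pos index arithmetic.
import Mathlib
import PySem

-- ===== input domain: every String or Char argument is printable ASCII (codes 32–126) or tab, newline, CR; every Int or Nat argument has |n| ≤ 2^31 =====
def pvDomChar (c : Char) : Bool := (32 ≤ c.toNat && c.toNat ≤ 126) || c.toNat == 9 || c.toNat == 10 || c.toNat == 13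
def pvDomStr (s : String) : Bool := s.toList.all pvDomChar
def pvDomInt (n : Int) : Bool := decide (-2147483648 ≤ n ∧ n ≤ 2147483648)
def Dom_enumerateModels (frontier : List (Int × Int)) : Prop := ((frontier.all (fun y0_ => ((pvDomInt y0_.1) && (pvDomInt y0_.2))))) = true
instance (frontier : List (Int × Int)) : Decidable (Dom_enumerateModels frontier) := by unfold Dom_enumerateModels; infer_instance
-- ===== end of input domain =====

-- B drops itertools and grows the model list iteratively, branching every partial model
-- into the four (pit,wumpus) extensions per square; objective: simpler decomposition.

-- ===== PORT A =====
-- product([True, False], repeat=k): first slot varies slowest, exactly itertools order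
def pvCfgs : Nat → List (List Bool)
  | 0 => [[]]
  | n + 1 => [true, false].flatMap (fun b => (pvCfgs n).map (b :: ·))

def enumerateModels (frontier : List (Int × Int)) : List (List (Int × Bool × Bool)) :=
  (pvCfgs (frontier.length * 2)).foldl
    (fun model_list model_config =>
      let built := frontier.foldl
        (fun (st : List (Int × Bool × Bool) × Int) square =>
          (st.1 ++ [(square.1,
                     (PySem.List.pyGet? model_config st.2).getD false,       -- model_config[pos] (always in range)
                     (PySem.List.pyGet? model_config (st.2 + 1)).getD false)],
           st.2 + 2))
        ([], 0)
      model_list ++ [built.1])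
    []

-- ===== PORT B =====
-- models = [[]]; for square in frontier: models = [m + [(square[0], pit, wumpus)] for m for pit for wumpus]
def enumerateModels_alt (frontier : List (Int × Int)) : List (List (Int × Bool × Bool)) :=
  frontier.foldl
    (fun models square =>
      models.flatMap (fun m =>
        [true, false].flatMap (fun pit =>
          [true, false].map (fun wumpus => m ++ [(square.1, pit, wumpus)]))))
    [[]]

-- ===== PRECONDITION & SPEC =====
def Spec_enumerateModels (frontier : List (Int × Int)) (out : List (List (Int × Bool × Bool))) : Prop := out = enumerateModels_alt frontier
instance (frontier : List (Int × Int)) (out : List (List (Int × Bool × Bool))) : Decidable (Spec_enumerateModels frontier out) := by unfold Spec_enumerateModels; infer_instance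

-- ===== CLAIM (what is proved, stated in full; the proofs are below) =====
def Claim_equal_enumerateModels : Prop := ∀ (frontier : List (Int × Int)), Dom_enumerateModels frontier → Spec_enumerateModels frontier (enumerateModels frontier)

-- ===== LEMMAS AND PROOFS =====

def pvOptions : List (Bool × Bool) := [(true, true), (true, false), (false, true), (false, false)]

-- head-recursive form of the enumeration
def pvHd : List (Int × Int) → List (List (Int × Bool × Bool))
  | [] => [[]]
  | sq :: rest => pvOptions.flatMap (fun o => (pvHd rest).map (fun m => (sq.1, o.1, o.2) :: m))

-- A's inner loop as a direct recursion over frontier with the running position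
def pvBuild (config : List Bool) : List (Int × Int) → Int → List (Int × Bool × Bool)
  | [], _ => []
  | sq :: rest, pos =>
      (sq.1, (PySem.List.pyGet? config pos).getD false,
             (PySem.List.pyGet? config (pos + 1)).getD false) :: pvBuild config rest (pos + 2)

theorem pvGetElem_cons_two {α : Type} (x y : α) (l : List α) (n : Nat) :
    (x :: y :: l)[n + 2]? = l[n]? := by
  show (x :: y :: l)[(n + 1) + 1]? = l[n]?
  rw [List.getElem?_cons_succ, List.getElem?_cons_succ]

theorem pvBuild_foldl (config : List Bool) (fr : List (Int × Int)) :
    ∀ (acc : List (Int × Bool × Bool)) (pos : Int),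
      (fr.foldl
        (fun (st : List (Int × Bool × Bool) × Int) square =>
          (st.1 ++ [(square.1,
                     (PySem.List.pyGet? config st.2).getD false,
                     (PySem.List.pyGet? config (st.2 + 1)).getD false)],
           st.2 + 2)) (acc, pos)).1 = acc ++ pvBuild config fr pos := by
  induction fr with
  | nil => intro acc pos; simp [pvBuild]
  | cons sq rest ih =>
      intro acc pos
      simp only [List.foldl_cons, pvBuild, ih, List.append_assoc, List.singleton_append]

theorem pvBuild_shift (a b : Bool) (c : List Bool) (fr : List (Int × Int)) :
    ∀ (n : Nat), pvBuild (a :: b :: c) fr ((n : Int) + 2) = pvBuild c fr (n : Int) := by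
  induction fr with
  | nil => intro n; simp [pvBuild]
  | cons sq rest ih =>
      intro n
      have h3 : ((n : Int) + 2 + 2) = ((n + 2 : Nat) : Int) + 2 := by push_cast; ring
      have h2 : ((n : Int) + 2 + 1) = ((n + 3 : Nat) : Int) := by push_cast; ring
      have h1 : ((n : Int) + 2) = ((n + 2 : Nat) : Int) := by push_cast; ring
      have h4 : ((n : Int) + 1) = ((n + 1 : Nat) : Int) := by push_cast; ring
      rw [pvBuild, pvBuild, h3, h2, h1, h4, ih (n + 2)]
      simp only [PySem.List.pyGet?_natCast]
      rw [show n + 3 = (n + 1) + 2 from by ring, pvGetElem_cons_two, pvGetElem_cons_two]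

theorem pvBuild_cons (a b : Bool) (c : List Bool) (sq : Int × Int) (rest : List (Int × Int)) :
    pvBuild (a :: b :: c) (sq :: rest) 0 = (sq.1, a, b) :: pvBuild c rest 0 := by
  have hs : pvBuild (a :: b :: c) rest ((0 : Int) + 2) = pvBuild c rest 0 := by
    have := pvBuild_shift a b c rest 0
    simpa using this
  rw [pvBuild, hs]
  rw [show (0 : Int) = ((0 : Nat) : Int) from rfl]
  rw [show ((0 : Nat) : Int) + 1 = ((1 : Nat) : Int) from by norm_num]
  simp

-- A's enumeration (map over flat bit vectors) equals the head recursion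
theorem pvMain (fr : List (Int × Int)) :
    (pvCfgs (fr.length * 2)).map (fun cfg => pvBuild cfg fr 0) = pvHd fr := by
  induction fr with
  | nil => simp [pvCfgs, pvHd, pvBuild]
  | cons sq rest ih =>
      have hlen : (sq :: rest).length * 2 = rest.length * 2 + 1 + 1 := by
        simp [List.length_cons]; ring
      rw [hlen]
      have key : ∀ (a b : Bool),
          (pvCfgs (rest.length * 2)).map (fun c => pvBuild (a :: b :: c) (sq :: rest) 0)
            = (pvHd rest).map (fun m => (sq.1, a, b) :: m) := by
        intro a b
        have e1 : (pvCfgs (rest.length * 2)).map (fun c => pvBuild (a :: b :: c) (sq :: rest) 0)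
            = ((pvCfgs (rest.length * 2)).map (fun c => pvBuild c rest 0)).map
                (fun m => (sq.1, a, b) :: m) := by
          rw [List.map_map]
          simp only [List.map_inj_left, Function.comp_def]
          intro c _
          exact pvBuild_cons a b c sq rest
        rw [e1, ih]
      simp only [pvCfgs, pvHd, pvOptions, List.flatMap_cons, List.flatMap_nil,
        List.append_nil, List.map_append, List.map_map, Function.comp_def, List.append_assoc]
      rw [key true true, key true false, key false true, key false false]

-- B's fold starting from any model list, expressed through the head recursion
theorem pvAlt_foldl (fr : List (Int × Int)) :
    ∀ (M : List (List (Int × Bool × Bool))),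
      fr.foldl
        (fun models square =>
          models.flatMap (fun m =>
            [true, false].flatMap (fun pit =>
              [true, false].map (fun wumpus => m ++ [(square.1, pit, wumpus)])))) M
        = M.flatMap (fun m => (pvHd fr).map (fun t => m ++ t)) := by
  induction fr with
  | nil => intro M; simp [pvHd]
  | cons sq rest ih =>
      intro M
      rw [List.foldl_cons, ih]
      rw [List.flatMap_assoc]
      simp only [pvHd, pvOptions, List.flatMap_cons, List.flatMap_nil, List.append_nil,
        List.map_cons, List.map_nil, List.map_append, List.map_map, Function.comp_def]
      simp [List.append_assoc]

theorem enumerateModels_eq_hd (fr : List (Int × Int)) :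
    enumerateModels fr = pvHd fr := by
  unfold enumerateModels
  rw [PySem.List.foldl_append_singleton_eq_map]
  rw [List.nil_append, ← pvMain fr]
  simp only [List.map_inj_left]
  intro cfg _
  rw [pvBuild_foldl cfg fr [] 0, List.nil_append]

theorem enumerateModels_alt_eq_hd (fr : List (Int × Int)) :
    enumerateModels_alt fr = pvHd fr := by
  unfold enumerateModels_alt
  rw [pvAlt_foldl fr [[]]]
  simp

-- ===== VERDICT (by name: the statement is the Claim_ definition above) =====
theorem enumerateModels_spec : Claim_equal_enumerateModels := by
  intro fr _
  unfold Spec_enumerateModels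
  rw [enumerateModels_eq_hd, enumerateModels_alt_eq_hd]
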